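-- pv_equiv track=rewrite | github.com/estomagordo/everybody-codes | 2024-10.py | obtain_password
-- ===== SOURCE A (Python) =====
-- def obtain_password(grid):
--     written = []
--
--     while any('.' in row for row in grid):
--         for y, row in enumerate(grid):
--             for x, character in enumerate(row):
--                 if character == '.':
--                     rowlets = set(c for c in row if c != '.')
--                     collets = set(line[x] for line in grid if line[x] != '.')
--                     combination = rowlets&collets
--
--                     if len(combination) == 1:
--                         putting = list(combination)[0]
--                         grid[y][x] = putting
--                         written.append((y, x, putting))
--
--     return ''.join(t[2] for t in sorted(written))
-- ===== SOURCE B (Python) =====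
-- def obtain_password(grid):
--     pending = [(y, x) for y, row in enumerate(grid) for x, c in enumerate(row) if c == '.']
--     rowsets = [set(c for c in row if c != '.') for row in grid]
--     colsets = {x: set(row[x] for row in grid if row[x] != '.')
--                for x in set(x for _, x in pending)}
--     written = []
--     while pending:
--         remaining = []
--         for y, x in pending:
--             comb = rowsets[y] & colsets[x]
--             if len(comb) == 1:
--                 p, = comb
--                 rowsets[y].add(p)
--                 colsets[x].add(p)
--                 written.append((y, x, p))
--             else:
--                 remaining.append((y, x))
--         if len(remaining) == len(pending):
--             break
--         pending = remaining
--     return ''.join(p for _, _, p in sorted(written))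
-- ===== Notes on version B (the rewrite author's own statement) =====
-- stated objective: alternative
-- what changed: A repeatedly rescans the whole grid and rebuilds each row's and column's letter set from scratch for every unfilled cell on every pass; B builds the dot worklist and the row/column letter sets once, then iterates only over the still-unfilled cells, updating the affected row and column sets incrementally when a cell is filled, and stops on a no-progress pass (where A's while-loop never terminates, so A returns on no such input).
import Mathlib
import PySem

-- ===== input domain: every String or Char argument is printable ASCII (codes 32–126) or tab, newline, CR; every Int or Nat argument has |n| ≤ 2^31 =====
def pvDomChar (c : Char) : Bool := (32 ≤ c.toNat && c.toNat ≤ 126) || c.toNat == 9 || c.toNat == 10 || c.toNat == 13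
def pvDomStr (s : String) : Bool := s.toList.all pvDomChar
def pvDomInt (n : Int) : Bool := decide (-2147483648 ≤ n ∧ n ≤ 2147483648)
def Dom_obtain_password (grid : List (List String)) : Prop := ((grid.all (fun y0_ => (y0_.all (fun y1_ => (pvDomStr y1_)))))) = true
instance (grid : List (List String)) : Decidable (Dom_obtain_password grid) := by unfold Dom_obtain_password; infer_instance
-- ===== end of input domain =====

-- B replaces A's repeated full-grid passes that recompute each row/column letter set per cell
-- by a worklist of unfilled dot cells with incrementally maintained row/column letter sets
-- (objective: alternative). Python A mutates `grid` in place; the equivalence is about the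
-- return value only. A's `while` loop never terminates when a pass fills no cell; both ports run with
-- a fuel bound and exit on such a no-progress pass (a totality harness only — Python A never
-- returns there, so nothing is claimed about those inputs' Python value).

-- ===== PORT A =====
-- set(c for c in row if c != '.')
def pvRowlets (row : List String) : PySem.Set String :=
  PySem.Set.ofList (row.filter (fun c => c != "."))

-- set(line[x] for line in grid if line[x] != '.')   (line[x] via pyGetD; exact under Pre_)
def pvCollets (g : List (List String)) (x : Nat) : PySem.Set String :=
  PySem.Set.ofList ((g.map (fun line => PySem.List.pyGetD line (x : Int) "")).filter (fun c => c != "."))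

-- the body of A's two nested `for` loops at one cell c = (y, x)
def pvStepA (st : List (List String) × List (Int × Int × String)) (c : Nat × Nat) :
    List (List String) × List (Int × Int × String) :=
  let row := st.1.getD c.1 []
  if row.getD c.2 "" = "." then
    let comb := PySem.Set.inter (pvRowlets row) (pvCollets st.1 c.2)
    if PySem.Set.len comb = 1 then
      let p := comb.getD 0 ""
      (st.1.set c.1 (row.set c.2 p), st.2 ++ [((c.1 : Int), (c.2 : Int), p)])
    else st
  else st

-- one full pass: for y, row in enumerate(grid): for x, character in enumerate(row): …
def pvPassA (st : List (List String) × List (Int × Int × String)) :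
    List (List String) × List (Int × Int × String) :=
  (List.range st.1.length).foldl
    (fun s y => (List.range (s.1.getD y []).length).foldl (fun s2 x => pvStepA s2 (y, x)) s) st

-- while any('.' in row for row in grid): …   (fuel + no-progress exit as totality harness)
def pvLoopA : Nat → List (List String) × List (Int × Int × String) → List (Int × Int × String)
  | 0, st => st.2
  | n + 1, st =>
    if st.1.any (fun row => row.contains ".") then
      let st' := pvPassA st
      if st'.1 = st.1 then st'.2 else pvLoopA n st'
    else st.2

def obtain_password (grid : List (List String)) : String :=
  let written := pvLoopA ((grid.map (fun r => r.count ".")).sum + 1) (grid, [])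
  -- sorted(written): the (y, x) pairs in written are pairwise distinct (each cell is filled at
  -- most once), so Python's lexicographic triple sort is the stable sort by the (y, x) key pair.
  PySem.Str.join "" ((PySem.List.sorted2 written (fun t => t.1) (fun t => t.2.1)).map (fun t => t.2.2))

-- ===== PORT B =====
-- pending = [(y, x) for y, row in enumerate(grid) for x, c in enumerate(row) if c == '.']
def pvDots (g : List (List String)) : List (Nat × Nat) :=
  (List.range g.length).flatMap (fun y =>
    (List.range (g.getD y []).length).filterMap (fun x =>
      if (g.getD y []).getD x "" = "." then some (y, x) else none))

structure PvStB where
  rows : List (PySem.Set String)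
  cols : PySem.Dict Int (PySem.Set String)
  written : List (Int × Int × String)
  remaining : List (Nat × Nat)

-- the body of B's `for y, x in pending` loop at one worklist entry c = (y, x)
def pvStepB (st : PvStB) (c : Nat × Nat) : PvStB :=
  let comb := PySem.Set.inter (st.rows.getD c.1 []) (st.cols.getD (c.2 : Int) [])
  if PySem.Set.len comb = 1 then
    let p := comb.getD 0 ""
    { rows := st.rows.set c.1 (PySem.Set.add (st.rows.getD c.1 []) p)
      cols := st.cols.modify (c.2 : Int) [] (fun s => PySem.Set.add s p)
      written := st.written ++ [((c.1 : Int), (c.2 : Int), p)]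
      remaining := st.remaining }
  else { st with remaining := st.remaining ++ [c] }

-- while pending: … if len(remaining) == len(pending): break; pending = remaining
-- (fuel as totality harness; B's own break guard is what terminates the Python loop)
def pvLoopB : Nat → PvStB → List (Nat × Nat) → List (Int × Int × String)
  | 0, st, _ => st.written
  | n + 1, st, pending =>
    if pending.isEmpty then st.written
    else
      let st' := pending.foldl pvStepB { st with remaining := [] }
      if st'.remaining.length = pending.length then st'.written
      else pvLoopB n st' st'.remaining

def obtain_password_alt (grid : List (List String)) : String :=
  let pending := pvDots grid
  let rows := grid.map pvRowlets
  -- colsets = {x: set(row[x] for row in grid if row[x] != '.') for x in set(x for _, x in pending)}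
  let cols := (PySem.Set.ofList (pending.map (fun c => c.2))).foldl
    (fun d x => d.insert (x : Int) (pvCollets grid x)) PySem.Dict.empty
  let written := pvLoopB ((grid.map (fun r => r.count ".")).sum + 1) ⟨rows, cols, [], []⟩ pending
  PySem.Str.join "" ((PySem.List.sorted2 written (fun t => t.1) (fun t => t.2.1)).map (fun t => t.2.2))

-- ===== PRECONDITION & SPEC =====
-- Pre_ excludes exactly the grids on which Python A raises IndexError: a '.' sits in a column x
-- while some (other) row is too short, so `line[x]` inside the collets comprehension is out of range.
def Pre_obtain_password (grid : List (List String)) : Prop :=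
  ∀ row ∈ grid, ∀ x : Nat, x < row.length → row.getD x "" = "." → ∀ r ∈ grid, x < r.length
instance (grid : List (List String)) : Decidable (Pre_obtain_password grid) := by
  unfold Pre_obtain_password; infer_instance
def pvWitness_obtain_password : List (List String) := [["a", "."], [".", "a"]]

def Spec_obtain_password (grid : List (List String)) (out : String) : Prop := out = obtain_password_alt grid
instance (grid : List (List String)) (out : String) : Decidable (Spec_obtain_password grid out) := by
  unfold Spec_obtain_password; infer_instance

-- ===== CLAIM (what is proved, stated in full; the proofs are below) =====
def Claim_equal_obtain_password : Prop := ∀ (grid : List (List String)), Dom_obtain_password grid → Pre_obtain_password grid → Spec_obtain_password grid (obtain_password grid)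

-- ===== LEMMAS AND PROOFS =====

-- the current value of cell c = (y, x) (out-of-range reads give "", which is never ".")
def pvCell (g : List (List String)) (c : Nat × Nat) : String := (g.getD c.1 []).getD c.2 ""

def pvAllCells (g : List (List String)) : List (Nat × Nat) :=
  (List.range g.length).flatMap (fun y => (List.range (g.getD y []).length).map (fun x => (y, x)))

def PvSetEq (s t : List String) : Prop := ∀ a, a ∈ s ↔ a ∈ t

-- the simulation invariant: B's maintained structures describe A's current grid
def PvInv (X0 : List Nat) (g : List (List String)) (rows : List (PySem.Set String))
    (cols : PySem.Dict Int (PySem.Set String)) : Prop :=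
  rows.length = g.length ∧
  (∀ y, PvSetEq (rows.getD y []) (pvRowlets (g.getD y []))) ∧
  (∀ y, (rows.getD y []).Nodup) ∧
  (∀ x ∈ X0, PvSetEq (cols.getD (x : Int) []) (pvCollets g x) ∧ (cols.getD (x : Int) []).Nodup)

theorem pvStepA_fst_length (st : List (List String) × List (Int × Int × String)) (c : Nat × Nat) :
    (pvStepA st c).1.length = st.1.length := by
  simp only [pvStepA]
  split_ifs <;> simp

theorem pvStepA_row_length (st : List (List String) × List (Int × Int × String)) (c : Nat × Nat)
    (y : Nat) : ((pvStepA st c).1.getD y []).length = (st.1.getD y []).length := by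
  simp only [pvStepA]
  split_ifs
  case _ =>
    by_cases hlt : c.1 < st.1.length
    · simp only [List.getD_eq_getElem?_getD, List.getElem?_set]
      split_ifs with h1
      · subst h1; simp [List.getElem?_eq_getElem hlt]
      · rfl
    · rw [List.set_eq_of_length_le (by omega)]
  all_goals rfl

theorem pvStepA_cell_ne (st : List (List String) × List (Int × Int × String)) (c c' : Nat × Nat)
    (h : c' ≠ c) : pvCell (pvStepA st c).1 c' = pvCell st.1 c' := by
  obtain ⟨y, x⟩ := c
  obtain ⟨y', x'⟩ := c'
  simp only [pvStepA]; unfold pvCell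
  split_ifs with h1 h2
  · by_cases hy : y = y'
    · subst hy
      have hx : x' ≠ x := by simpa [Prod.ext_iff] using h
      by_cases hlt : y < st.1.length
      · simp only [List.getD_eq_getElem?_getD, List.getElem?_set]
        simp only [if_pos hlt, if_true, Option.getD_some,
          List.getElem?_set_ne (Ne.symm hx)]
      · rw [List.set_eq_of_length_le (by omega)]
    · simp only [List.getD_eq_getElem?_getD, List.getElem?_set, if_neg hy]
  · rfl
  · rfl

theorem pvStepA_not_dot (st : List (List String) × List (Int × Int × String)) (c : Nat × Nat)
    (h : pvCell st.1 c ≠ ".") : pvStepA st c = st := by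
  simp only [pvStepA]
  rw [if_neg (by unfold pvCell at h; exact h)]

theorem pv_foldl_inv {σ α : Type} (I : σ → Prop) (f : σ → α → σ) (l : List α) (s : σ)
    (hs : I s) (hpres : ∀ s a, I s → I (f s a)) : I (l.foldl f s) := by
  induction l generalizing s with
  | nil => exact hs
  | cons a t ih => exact ih _ (hpres _ _ hs)

theorem pv_foldl_congr_inv {σ α : Type} (I : σ → Prop) (f f' : σ → α → σ) (l : List α) (s : σ)
    (hs : I s) (hpres : ∀ s a, I s → I (f s a)) (heq : ∀ s a, I s → f s a = f' s a) :
    l.foldl f s = l.foldl f' s := by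
  induction l generalizing s with
  | nil => rfl
  | cons a t ih =>
    simp only [List.foldl_cons]
    rw [← heq _ _ hs]
    exact ih _ (hpres _ _ hs)

theorem pv_foldl_filter {σ α : Type} (f : σ → α → σ) (P : σ → α → Bool) (l : List α) (s : σ)
    (hnd : l.Nodup) (h1 : ∀ s a, P s a = false → f s a = s)
    (h2 : ∀ s a b, b ≠ a → P (f s a) b = P s b) :
    l.foldl f s = (l.filter (P s)).foldl f s := by
  induction l generalizing s with
  | nil => rfl
  | cons a t ih =>
    have hnd' : t.Nodup := hnd.of_cons
    have hna : a ∉ t := by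
      intro hmem
      exact (List.nodup_cons.mp hnd).1 hmem
    by_cases hPa : P s a = true
    · have hfc : List.filter (P (f s a)) t = List.filter (P s) t :=
        List.filter_congr (fun b hb => h2 s a b (fun he => hna (he ▸ hb)))
      rw [List.foldl_cons, List.filter_cons, if_pos hPa, List.foldl_cons, ih _ hnd', hfc]
    · have hPa' : P s a = false := by
        cases hpa : P s a
        · rfl
        · exact absurd hpa hPa
      simp only [List.foldl_cons, List.filter_cons, hPa', Bool.false_eq_true, if_false]
      rw [h1 s a hPa']
      exact ih _ hnd'

theorem pv_mem_allCells (g : List (List String)) (c : Nat × Nat) :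
    c ∈ pvAllCells g ↔ c.1 < g.length ∧ c.2 < (g.getD c.1 []).length := by
  obtain ⟨y, x⟩ := c
  simp only [pvAllCells, List.mem_flatMap, List.mem_range, List.mem_map]
  constructor
  · rintro ⟨y', hy', x', hx', he⟩
    obtain ⟨h1, h2⟩ := Prod.mk.injEq .. ▸ he
    cases he
    exact ⟨hy', hx'⟩
  · rintro ⟨hy, hx⟩
    exact ⟨y, hy, x, hx, rfl⟩

theorem pv_nodup_allCells (g : List (List String)) : (pvAllCells g).Nodup := by
  unfold pvAllCells
  rw [List.nodup_flatMap]
  constructor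
  · intro y _
    exact (List.nodup_range).map (fun a b h => (Prod.mk.injEq .. ▸ h).2)
  · apply List.Pairwise.imp ?_ (List.pairwise_lt_range)
    intro a b hab p hp hq
    simp only [List.mem_map] at hp hq
    obtain ⟨xa, _, rfl⟩ := hp
    obtain ⟨xb, _, he⟩ := hq
    exact absurd (Prod.mk.injEq .. ▸ he.symm).1 (Nat.ne_of_lt hab)

theorem pv_allCells_congr (g g' : List (List String)) (hlen : g'.length = g.length)
    (hrow : ∀ y, (g'.getD y []).length = (g.getD y []).length) :
    pvAllCells g' = pvAllCells g := by
  unfold pvAllCells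
  rw [hlen]
  exact List.flatMap_congr (fun y _ => by rw [hrow y])

theorem pv_filterMap_if {α β : Type} (f : α → β) (p : β → Prop) [DecidablePred p] (q : β → Bool)
    (hq : ∀ b, (q b = true) ↔ p b) (l : List α) :
    l.filterMap (fun x => if p (f x) then some (f x) else none) = (l.map f).filter q := by
  induction l with
  | nil => rfl
  | cons a t ih =>
    simp only [List.filterMap_cons, List.map_cons, List.filter_cons]
    by_cases h : p (f a)
    · rw [if_pos h, if_pos ((hq (f a)).mpr h)]
      simp only [ih]
    · rw [if_neg h, if_neg (fun hb => h ((hq (f a)).mp hb))]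
      exact ih

theorem pvDots_eq_filter (g : List (List String)) :
    pvDots g = (pvAllCells g).filter (fun c => pvCell g c == ".") := by
  unfold pvDots pvAllCells
  rw [List.filter_flatMap]
  apply List.flatMap_congr
  intro y _
  have := pv_filterMap_if (fun x : Nat => ((y, x) : Nat × Nat))
    (fun c => (g.getD c.1 []).getD c.2 "" = ".") (fun c => pvCell g c == ".")
    (fun c => by simp [pvCell, beq_iff_eq]) (List.range (g.getD y []).length)
  exact this

theorem pv_mem_dots (g : List (List String)) (c : Nat × Nat) :
    c ∈ pvDots g ↔ c.1 < g.length ∧ c.2 < (g.getD c.1 []).length ∧ pvCell g c = "." := by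
  rw [pvDots_eq_filter, List.mem_filter, pv_mem_allCells]
  simp [beq_iff_eq, and_assoc]

theorem pv_nodup_dots (g : List (List String)) : (pvDots g).Nodup := by
  rw [pvDots_eq_filter]
  exact (pv_nodup_allCells g).filter _

theorem pvPassA_eq (g : List (List String)) (w : List (Int × Int × String)) :
    pvPassA (g, w) = (pvDots g).foldl pvStepA (g, w) := by
  have hAll : pvPassA (g, w) = (pvAllCells g).foldl pvStepA (g, w) := by
    unfold pvPassA pvAllCells
    have hfm : ∀ (l : List Nat) (st : List (List String) × List (Int × Int × String)),
        (l.flatMap (fun y => (List.range (g.getD y []).length).map (fun x => (y, x)))).foldl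
          pvStepA st
        = l.foldl (fun s y =>
            (List.range (g.getD y []).length).foldl (fun s2 x => pvStepA s2 (y, x)) s) st := by
      intro l
      induction l with
      | nil => intro st; rfl
      | cons a t ih =>
        intro st
        simp only [List.flatMap_cons, List.foldl_append, List.foldl_cons, List.foldl_map]
        exact ih _
    rw [hfm]
    apply pv_foldl_congr_inv
      (fun s => s.1.length = g.length ∧ ∀ y, (s.1.getD y []).length = (g.getD y []).length)
    · exact ⟨rfl, fun _ => rfl⟩
    · intro st y hI
      exact pv_foldl_inv
        (fun s => s.1.length = g.length ∧ ∀ y, (s.1.getD y []).length = (g.getD y []).length)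
        (fun s2 x => pvStepA s2 (y, x)) (List.range (st.1.getD y []).length) st hI
        (fun s2 x hI2 => ⟨(pvStepA_fst_length s2 (y, x)).trans hI2.1,
          fun y' => (pvStepA_row_length s2 (y, x) y').trans (hI2.2 y')⟩)
    · intro s y hI
      rw [hI.2 y]
  rw [hAll, pvDots_eq_filter]
  exact pv_foldl_filter pvStepA (fun s c => pvCell s.1 c == ".") (pvAllCells g) (g, w)
    (pv_nodup_allCells g)
    (fun s c hP => pvStepA_not_dot s c (by simpa [beq_iff_eq] using hP))
    (fun s c b hne => by
      simp only [pvStepA_cell_ne s c b hne])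

theorem pv_setEq_filter_set (l : List String) (i : Nat) (hi : i < l.length)
    (hdot : l.getD i "" = ".") (p : String) (hp : p ≠ ".") :
    PvSetEq (PySem.Set.ofList ((l.set i p).filter (fun c => c != ".")))
      (PySem.Set.add (PySem.Set.ofList (l.filter (fun c => c != "."))) p) := by
  intro a
  have hli : l[i] = "." := by rw [← List.getD_eq_getElem l "" hi]; exact hdot
  rw [PySem.Set.mem_ofList, PySem.Set.mem_add, PySem.Set.mem_ofList,
    List.mem_filter, List.mem_filter]
  simp only [bne_iff_ne, ne_eq]
  constructor
  · rintro ⟨hmem, hne⟩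
    rcases List.mem_or_eq_of_mem_set hmem with h | h
    · exact Or.inl ⟨h, hne⟩
    · exact Or.inr h
  · rintro (⟨hmem, hne⟩ | rfl)
    · obtain ⟨j, hj, hja⟩ := List.mem_iff_getElem.mp hmem
      have hji : j ≠ i := by
        intro he
        subst he
        rw [hja] at hli
        exact hne hli
      refine ⟨List.mem_iff_getElem.mpr ⟨j, by simpa using hj, ?_⟩, hne⟩
      rw [List.getElem_set_ne (Ne.symm hji)]
      exact hja
    · exact ⟨List.mem_set hi _, hp⟩

theorem pv_perm_of_setEq {s t : List String} (h : PvSetEq s t) (hs : s.Nodup) (ht : t.Nodup) :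
    s.Perm t := (List.perm_ext_iff_of_nodup hs ht).mpr h

theorem pv_anyDot (g : List (List String)) :
    (g.any (fun row => row.contains ".")) = true ↔ pvDots g ≠ [] := by
  rw [List.any_eq_true, Ne, List.eq_nil_iff_forall_not_mem]
  push Not
  constructor
  · rintro ⟨row, hrow, hdot⟩
    obtain ⟨y, hy, hrye⟩ := List.mem_iff_getElem.mp hrow
    rw [List.contains_iff_mem] at hdot
    obtain ⟨x, hx, hxe⟩ := List.mem_iff_getElem.mp hdot
    refine ⟨(y, x), (pv_mem_dots g (y, x)).mpr ?_⟩
    have hg : g.getD y [] = row := by rw [List.getD_eq_getElem g [] hy, hrye]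
    refine ⟨hy, by rw [hg]; exact hx, ?_⟩
    unfold pvCell
    rw [hg, List.getD_eq_getElem row "" hx, hxe]
  · rintro ⟨c, hc⟩
    obtain ⟨hy, hx, hdot⟩ := (pv_mem_dots g c).mp hc
    refine ⟨g.getD c.1 [], by rw [List.getD_eq_getElem g [] hy]; exact List.getElem_mem hy, ?_⟩
    rw [List.contains_iff_mem]
    unfold pvCell at hdot
    rw [← hdot]
    rw [List.getD_eq_getElem _ _ hx]
    exact List.getElem_mem hx

theorem pv_cols_init_getD (g : List (List String)) (xs : List Nat) (hnd : xs.Nodup)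
    (x : Nat) (hx : x ∈ xs) :
    ((xs.foldl (fun d x => d.insert (x : Int) (pvCollets g x)) PySem.Dict.empty).getD (x : Int) [])
      = pvCollets g x := by
  have hskip : ∀ (ys : List Nat) (d : PySem.Dict Int (PySem.Set String)) (z : Nat), z ∉ ys →
      ((ys.foldl (fun d x => d.insert (x : Int) (pvCollets g x)) d).getD (z : Int) [])
        = d.getD (z : Int) [] := by
    intro ys
    induction ys with
    | nil => intro d z _; rfl
    | cons a t ih =>
      intro d z hz
      rw [List.foldl_cons, ih _ z (fun h => hz (List.mem_cons_of_mem a h))]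
      exact PySem.Dict.getD_insert_of_ne d _ _
        (fun h => hz (by simp [Int.natCast_inj.mp h]))
  have hgen : ∀ (ys : List Nat) (d : PySem.Dict Int (PySem.Set String)), ys.Nodup → x ∈ ys →
      ((ys.foldl (fun d x => d.insert (x : Int) (pvCollets g x)) d).getD (x : Int) [])
        = pvCollets g x := by
    intro ys
    induction ys with
    | nil => intro _ _ h; exact absurd h (List.not_mem_nil)
    | cons a t ih =>
      intro d hndc hmem
      rcases List.mem_cons.mp hmem with rfl | hmt
      · rw [List.foldl_cons, hskip t _ x (List.nodup_cons.mp hndc).1]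
        exact PySem.Dict.getD_insert_self d _ _ _
      · rw [List.foldl_cons]
        exact ih _ hndc.of_cons hmt
  exact hgen xs PySem.Dict.empty hnd hx

theorem pvStepA_snd_extends (st : List (List String) × List (Int × Int × String)) (c : Nat × Nat) :
    ∃ e, (pvStepA st c).2 = st.2 ++ e := by
  simp only [pvStepA]
  split_ifs
  · exact ⟨_, rfl⟩
  · exact ⟨[], by simp⟩
  · exact ⟨[], by simp⟩

theorem pv_written_extends (todo : List (Nat × Nat)) :
    ∀ st : List (List String) × List (Int × Int × String),
    ∃ rest, (todo.foldl pvStepA st).2 = st.2 ++ rest := by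
  induction todo with
  | nil => intro st; exact ⟨[], by simp⟩
  | cons c t ih =>
    intro st
    rw [List.foldl_cons]
    obtain ⟨rest, hr⟩ := ih (pvStepA st c)
    obtain ⟨e, he⟩ := pvStepA_snd_extends st c
    exact ⟨e ++ rest, by rw [hr, he, List.append_assoc]⟩

theorem pv_cell_fill (g : List (List String)) (c : Nat × Nat) (p : String)
    (hy : c.1 < g.length) (hx : c.2 < (g.getD c.1 []).length) :
    pvCell (g.set c.1 ((g.getD c.1 []).set c.2 p)) c = p := by
  unfold pvCell
  have h1 : (g.set c.1 ((g.getD c.1 []).set c.2 p)).getD c.1 [] = (g.getD c.1 []).set c.2 p := by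
    rw [List.getD_eq_getElem?_getD, List.getElem?_set_self hy, Option.getD_some]
  rw [h1, List.getD_eq_getElem?_getD, List.getElem?_set_self hx, Option.getD_some]

theorem pv_getD_set_self {α : Type} (l : List α) (i : Nat) (v d : α) (hi : i < l.length) :
    (l.set i v).getD i d = v := by
  rw [List.getD_eq_getElem?_getD, List.getElem?_set_self hi, Option.getD_some]

theorem pv_getD_set_ne {α : Type} (l : List α) (i j : Nat) (v d : α) (hij : i ≠ j) :
    (l.set i v).getD j d = l.getD j d := by
  rw [List.getD_eq_getElem?_getD, List.getElem?_set_ne hij, ← List.getD_eq_getElem?_getD]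

-- the fold over one pass: A over the current dot list, B over the same worklist
theorem pv_sim (X0 : List Nat) (todo : List (Nat × Nat)) :
    ∀ (g : List (List String)) (w : List (Int × Int × String))
      (rows : List (PySem.Set String)) (cols : PySem.Dict Int (PySem.Set String))
      (r0 : List (Nat × Nat)),
    PvInv X0 g rows cols → todo.Nodup →
    (∀ c ∈ todo, pvCell g c = "." ∧ c.1 < g.length ∧ c.2 ∈ X0) →
    (todo.foldl pvStepB ⟨rows, cols, w, r0⟩).written = (todo.foldl pvStepA (g, w)).2 ∧
    PvInv X0 (todo.foldl pvStepA (g, w)).1 (todo.foldl pvStepB ⟨rows, cols, w, r0⟩).rows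
      (todo.foldl pvStepB ⟨rows, cols, w, r0⟩).cols ∧
    (todo.foldl pvStepA (g, w)).1.length = g.length ∧
    (∀ y, ((todo.foldl pvStepA (g, w)).1.getD y []).length = (g.getD y []).length) ∧
    (∀ c', c' ∉ todo → pvCell (todo.foldl pvStepA (g, w)).1 c' = pvCell g c') ∧
    (todo.foldl pvStepB ⟨rows, cols, w, r0⟩).remaining
      = r0 ++ todo.filter (fun c => pvCell (todo.foldl pvStepA (g, w)).1 c == ".") ∧
    ((todo.foldl pvStepB ⟨rows, cols, w, r0⟩).written = w → (todo.foldl pvStepA (g, w)).1 = g) ∧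
    ((todo.foldl pvStepB ⟨rows, cols, w, r0⟩).written ≠ w →
      ∃ c ∈ todo, pvCell g c = "." ∧ pvCell (todo.foldl pvStepA (g, w)).1 c ≠ ".") := by
  induction todo with
  | nil =>
    intro g w rows cols r0 hInv hnd hc
    exact ⟨rfl, hInv, rfl, fun _ => rfl, fun _ _ => rfl, by simp, fun _ => rfl,
      fun h => absurd rfl h⟩
  | cons c t ih =>
    intro g w rows cols r0 hInv hnd hc
    obtain ⟨hdot, hy, hxX⟩ := hc c List.mem_cons_self
    have hndt : t.Nodup := hnd.of_cons
    have hcnt : c ∉ t := (List.nodup_cons.mp hnd).1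
    have hx2 : c.2 < (g.getD c.1 []).length := by
      by_contra hge
      have hnone : (g.getD c.1 []).getD c.2 "" = "" := by
        rw [List.getD_eq_getElem?_getD, List.getElem?_eq_none (by omega)]; rfl
      unfold pvCell at hdot
      rw [hnone] at hdot
      exact absurd hdot (by decide)
    have hdotU : (g.getD c.1 []).getD c.2 "" = "." := hdot
    obtain ⟨hlenInv, hrowsInv, hrowsNd, hcolsInv⟩ := hInv
    have hcol := hcolsInv c.2 hxX
    have hcombEq : PvSetEq
        (PySem.Set.inter (rows.getD c.1 []) (cols.getD ((c.2 : Nat) : Int) []))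
        (PySem.Set.inter (pvRowlets (g.getD c.1 [])) (pvCollets g c.2)) := fun a => by
      rw [PySem.Set.mem_inter, PySem.Set.mem_inter]
      exact and_congr (hrowsInv c.1 a) (hcol.1 a)
    have hcombPerm := pv_perm_of_setEq hcombEq
      (PySem.Set.nodup_inter _ _ (hrowsNd c.1))
      (PySem.Set.nodup_inter _ _ (PySem.Set.nodup_ofList _))
    simp only [List.foldl_cons]
    by_cases hl : PySem.Set.len (PySem.Set.inter (pvRowlets (g.getD c.1 [])) (pvCollets g c.2)) = 1
    · -- fill case
      obtain ⟨aa, hsingA⟩ := List.length_eq_one_iff.mp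
        (by simpa [PySem.Set.len] using hl :
          (PySem.Set.inter (pvRowlets (g.getD c.1 [])) (pvCollets g c.2)).length = 1)
      have hsingB : PySem.Set.inter (rows.getD c.1 []) (cols.getD ((c.2 : Nat) : Int) []) = [aa] :=
        List.perm_singleton.mp (hsingA ▸ hcombPerm)
      have hlB : PySem.Set.len (PySem.Set.inter (rows.getD c.1 []) (cols.getD ((c.2 : Nat) : Int) [])) = 1 := by
        rw [hsingB]; rfl
      have haa : aa ∈ PySem.Set.inter (pvRowlets (g.getD c.1 [])) (pvCollets g c.2) := by
        rw [hsingA]; exact List.mem_singleton.mpr rfl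
      have hp : aa ≠ "." := by
        have := ((PySem.Set.mem_inter _ _ _).mp haa).1
        rw [pvRowlets, PySem.Set.mem_ofList, List.mem_filter] at this
        simpa [bne_iff_ne] using this.2
      have hpA : List.getD (PySem.Set.inter (pvRowlets (g.getD c.1 [])) (pvCollets g c.2)) 0 "" = aa := by
        rw [hsingA]; rfl
      have hpB : List.getD (PySem.Set.inter (rows.getD c.1 []) (cols.getD ((c.2 : Nat) : Int) [])) 0 "" = aa := by
        rw [hsingB]; rfl
      have hA : pvStepA (g, w) c =
          (g.set c.1 ((g.getD c.1 []).set c.2 aa), w ++ [((c.1 : Int), (c.2 : Int), aa)]) := by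
        simp only [pvStepA]
        rw [if_pos hdotU, if_pos hl, hpA]
      have hB : pvStepB ⟨rows, cols, w, r0⟩ c =
          ⟨rows.set c.1 (PySem.Set.add (rows.getD c.1 []) aa),
           cols.modify ((c.2 : Nat) : Int) [] (fun s => PySem.Set.add s aa),
           w ++ [((c.1 : Int), (c.2 : Int), aa)], r0⟩ := by
        simp only [pvStepB]
        rw [if_pos hlB, hpB]
      set gl := g.set c.1 ((g.getD c.1 []).set c.2 aa) with hgl
      set wl := w ++ [((c.1 : Int), (c.2 : Int), aa)] with hwl
      set rows1 := rows.set c.1 (PySem.Set.add (rows.getD c.1 []) aa) with hrows1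
      set cols1 := cols.modify ((c.2 : Nat) : Int) [] (fun s => PySem.Set.add s aa) with hcols1
      have hyR : c.1 < rows.length := by omega
      have hglget : gl.getD c.1 [] = (g.getD c.1 []).set c.2 aa := pv_getD_set_self _ _ _ _ hy
      have hInv1 : PvInv X0 gl rows1 cols1 := by
        refine ⟨by simp [hrows1, hgl, hlenInv], ?_, ?_, ?_⟩
        · intro y
          by_cases hyc : y = c.1
          · subst hyc
            rw [hrows1, pv_getD_set_self _ _ _ _ hyR, hglget]
            intro a
            rw [PySem.Set.mem_add]
            unfold pvRowlets
            rw [pv_setEq_filter_set (g.getD c.1 []) c.2 hx2 hdotU aa hp a, PySem.Set.mem_add]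
            exact or_congr (hrowsInv c.1 a) Iff.rfl
          · rw [hrows1, pv_getD_set_ne _ _ _ _ _ (fun h => hyc h.symm), hgl,
              pv_getD_set_ne _ _ _ _ _ (fun h => hyc h.symm)]
            exact hrowsInv y
        · intro y
          by_cases hyc : y = c.1
          · subst hyc
            rw [hrows1, pv_getD_set_self _ _ _ _ hyR]
            exact PySem.Set.nodup_add _ _ (hrowsNd c.1)
          · rw [hrows1, pv_getD_set_ne _ _ _ _ _ (fun h => hyc h.symm)]
            exact hrowsNd y
        · intro x hxm
          by_cases hxc : x = c.2
          · subst hxc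
            rw [hcols1, PySem.Dict.getD_modify_self]
            have hmap : gl.map (fun line => PySem.List.pyGetD line ((c.2 : Nat) : Int) "")
                = (g.map (fun line => PySem.List.pyGetD line ((c.2 : Nat) : Int) "")).set c.1 aa := by
              rw [hgl, List.map_set]
              congr 1
              rw [PySem.List.pyGetD_natCast, pv_getD_set_self _ _ _ _ hx2]
            have hLi : c.1 < (g.map (fun line => PySem.List.pyGetD line ((c.2 : Nat) : Int) "")).length := by
              simpa using hy
            have hLdot : (g.map (fun line => PySem.List.pyGetD line ((c.2 : Nat) : Int) "")).getD c.1 "" = "." := by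
              rw [List.getD_eq_getElem _ _ hLi, List.getElem_map, PySem.List.pyGetD_natCast,
                ← List.getD_eq_getElem g [] hy]
              exact hdot
            constructor
            · intro a
              have hcoll : pvCollets gl c.2
                  = PySem.Set.ofList (((g.map (fun line => PySem.List.pyGetD line ((c.2 : Nat) : Int) "")).set c.1 aa).filter (fun cc => cc != ".")) := by
                unfold pvCollets
                rw [hmap]
              rw [PySem.Set.mem_add, hcoll]
              rw [pv_setEq_filter_set _ c.1 hLi hLdot aa hp a, PySem.Set.mem_add]
              show a ∈ cols.getD ((c.2 : Nat) : Int) [] ∨ a = aa ↔ a ∈ pvCollets g c.2 ∨ a = aa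
              exact or_congr (hcol.1 a) Iff.rfl
            · exact PySem.Set.nodup_add _ _ hcol.2
          · have hInt : ((x : Nat) : Int) ≠ ((c.2 : Nat) : Int) := by
              simpa [Int.natCast_inj] using hxc
            rw [hcols1, PySem.Dict.getD_modify_of_ne _ _ _ hInt]
            have hmap : gl.map (fun line => PySem.List.pyGetD line ((x : Nat) : Int) "")
                = g.map (fun line => PySem.List.pyGetD line ((x : Nat) : Int) "") := by
              rw [hgl, List.map_set]
              have hval : PySem.List.pyGetD ((g.getD c.1 []).set c.2 aa) ((x : Nat) : Int) ""
                  = (g.map (fun line => PySem.List.pyGetD line ((x : Nat) : Int) ""))[c.1]'(by simpa using hy) := by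
                rw [PySem.List.pyGetD_natCast, pv_getD_set_ne _ _ _ _ _ (fun h => hxc h.symm),
                  List.getElem_map, PySem.List.pyGetD_natCast, ← List.getD_eq_getElem g [] hy]
              rw [hval, List.set_getElem_self]
            have hco : pvCollets gl x = pvCollets g x := by
              unfold pvCollets
              rw [hmap]
            rw [hco]
            exact hcolsInv x hxm
      have hct : ∀ c' ∈ t, pvCell gl c' = "." ∧ c'.1 < gl.length ∧ c'.2 ∈ X0 := by
        intro c' hc't
        obtain ⟨hd', hy', hx'⟩ := hc c' (List.mem_cons_of_mem c hc't)
        have hne : c' ≠ c := fun he => hcnt (he ▸ hc't)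
        have hcell : pvCell gl c' = pvCell g c' := by
          have h := pvStepA_cell_ne (g, w) c c' hne
          rw [hA] at h
          exact h
        exact ⟨hcell.trans hd', by simpa [hgl] using hy', hx'⟩
      obtain ⟨W, I2, L1, L2, CE, RM, ST, PR⟩ := ih gl wl rows1 cols1 r0 hInv1 hndt hct
      rw [hA, hB]
      have hfinal_c : pvCell (t.foldl pvStepA (gl, wl)).1 c = aa :=
        (CE c hcnt).trans (pv_cell_fill g c aa hy hx2)
      refine ⟨W, I2, by simpa [hgl] using L1, ?_, ?_, ?_, ?_, ?_⟩
      · intro y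
        refine (L2 y).trans ?_
        have h := pvStepA_row_length (g, w) c y
        rw [hA] at h
        exact h
      · intro c' hn
        have hn1 : c' ∉ t := fun h => hn (List.mem_cons_of_mem c h)
        have hn2 : c' ≠ c := fun h => hn (h ▸ List.mem_cons_self)
        refine (CE c' hn1).trans ?_
        have h := pvStepA_cell_ne (g, w) c c' hn2
        rw [hA] at h
        exact h
      · rw [RM, List.filter_cons]
        have : (pvCell (t.foldl pvStepA (gl, wl)).1 c == ".") = false := by
          rw [hfinal_c]
          exact beq_eq_false_iff_ne.mpr hp
        rw [this]
        simp
      · intro hW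
        obtain ⟨rest, hr⟩ := pv_written_extends t (gl, wl)
        rw [W, hr, hwl] at hW
        have := congrArg List.length hW
        simp at this
      · intro _
        exact ⟨c, List.mem_cons_self, hdot, by rw [hfinal_c]; exact hp⟩
    · -- no-fill case
      have hlB : ¬ PySem.Set.len (PySem.Set.inter (rows.getD c.1 []) (cols.getD ((c.2 : Nat) : Int) [])) = 1 := by
        have hlen_eq := hcombPerm.length_eq
        simp only [PySem.Set.len] at hl ⊢
        omega
      have hA : pvStepA (g, w) c = (g, w) := by
        simp only [pvStepA]
        rw [if_pos hdotU, if_neg hl]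
      have hB : pvStepB ⟨rows, cols, w, r0⟩ c = ⟨rows, cols, w, r0 ++ [c]⟩ := by
        simp only [pvStepB]
        rw [if_neg hlB]
      have hct : ∀ c' ∈ t, pvCell g c' = "." ∧ c'.1 < g.length ∧ c'.2 ∈ X0 :=
        fun c' hc't => hc c' (List.mem_cons_of_mem c hc't)
      obtain ⟨W, I2, L1, L2, CE, RM, ST, PR⟩ :=
        ih g w rows cols (r0 ++ [c]) ⟨hlenInv, hrowsInv, hrowsNd, hcolsInv⟩ hndt hct
      rw [hA, hB]
      have hfinal_c : pvCell (t.foldl pvStepA (g, w)).1 c = "." :=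
        (CE c hcnt).trans hdot
      refine ⟨W, I2, L1, L2, ?_, ?_, ST, ?_⟩
      · intro c' hn
        exact CE c' (fun h => hn (List.mem_cons_of_mem c h))
      · rw [RM, List.filter_cons]
        have hT : (pvCell (t.foldl pvStepA (g, w)).1 c == ".") = true := by
          simp [hfinal_c]
        rw [hT]
        simp
      · intro hW
        obtain ⟨c', hc't, h1, h2⟩ := PR hW
        exact ⟨c', List.mem_cons_of_mem c hc't, h1, h2⟩

theorem pv_loop_sim (X0 : List Nat) :
    ∀ (n : Nat) (g : List (List String)) (w : List (Int × Int × String))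
      (rows : List (PySem.Set String)) (cols : PySem.Dict Int (PySem.Set String))
      (rem : List (Nat × Nat)),
    PvInv X0 g rows cols → (∀ c ∈ pvDots g, c.2 ∈ X0) →
    pvLoopA n (g, w) = pvLoopB n ⟨rows, cols, w, rem⟩ (pvDots g) := by
  intro n
  induction n with
  | zero => intro g w rows cols rem _ _; rfl
  | succ n ih =>
    intro g w rows cols rem hInv hX
    simp only [pvLoopA, pvLoopB]
    have hupd : ({ (⟨rows, cols, w, rem⟩ : PvStB) with remaining := [] }) = (⟨rows, cols, w, []⟩ : PvStB) := rfl
    by_cases hne : pvDots g = []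
    · have hAny : (g.any (fun row => row.contains ".")) = false := by
        rw [← Bool.not_eq_true, pv_anyDot]
        simpa using hne
      rw [hAny, hne]
      simp
    · have hAny : (g.any (fun row => row.contains ".")) = true := (pv_anyDot g).mpr hne
      rw [hAny]
      have hEmp : (pvDots g).isEmpty = false := by
        simpa [List.isEmpty_iff] using hne
      rw [hEmp]
      simp only [if_true, Bool.false_eq_true, if_false]
      have hmem : ∀ c ∈ pvDots g, pvCell g c = "." ∧ c.1 < g.length ∧ c.2 ∈ X0 := by
        intro c hc
        obtain ⟨h1, h2, h3⟩ := (pv_mem_dots g c).mp hc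
        exact ⟨h3, h1, hX c hc⟩
      obtain ⟨W, I2, L1, L2, CE, RM, ST, PR⟩ :=
        pv_sim X0 (pvDots g) g w rows cols [] hInv (pv_nodup_dots g) hmem
      rw [pvPassA_eq g w]
      set F := (pvDots g).foldl pvStepA (g, w) with hF
      set S := (pvDots g).foldl pvStepB ⟨rows, cols, w, []⟩ with hS
      have hmono : ∀ c', pvCell F.1 c' = "." → pvCell g c' = "." := by
        intro c' h
        by_cases hm : c' ∈ pvDots g
        · exact ((pv_mem_dots g c').mp hm).2.2
        · rw [← CE c' hm]; exact h
      have hdotsF : pvDots F.1 = S.remaining := by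
        rw [RM, List.nil_append, pvDots_eq_filter F.1,
          pv_allCells_congr g F.1 L1 L2, pvDots_eq_filter g, List.filter_filter]
        apply List.filter_congr
        intro c _
        by_cases hd : pvCell F.1 c = "."
        · simp [hd, hmono c hd]
        · simp [hd]
      by_cases hstall : F.1 = g
      · have hrem : S.remaining = pvDots g := by rw [← hdotsF, hstall]
        rw [if_pos hstall, if_pos (by rw [hrem])]
        exact W.symm
      · have hWne : S.written ≠ w := fun hEq => hstall (ST hEq)
        obtain ⟨c0, hc0mem, _, hc0not⟩ := PR hWne
        have hlt : S.remaining.length < (pvDots g).length := by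
          rw [RM, List.nil_append]
          exact List.length_filter_lt_length_iff_exists.mpr
            ⟨c0, hc0mem, by simp [hc0not]⟩
        rw [if_neg hstall, if_neg (by omega)]
        have hSeta : (⟨S.rows, S.cols, S.written, S.remaining⟩ : PvStB) = S := rfl
        have hX' : ∀ c ∈ pvDots F.1, c.2 ∈ X0 := by
          intro c hc
          rw [hdotsF, RM, List.nil_append] at hc
          exact hX c (List.mem_of_mem_filter hc)
        have hrec := ih F.1 F.2 S.rows S.cols S.remaining I2 hX'
        rw [hdotsF] at hrec
        show pvLoopA n (F.1, F.2) = pvLoopB n S S.remaining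
        rw [hrec, ← W, hSeta]

theorem pv_main (grid : List (List String)) : obtain_password grid = obtain_password_alt grid := by
  unfold obtain_password obtain_password_alt
  have hrows0 : ∀ y, (grid.map pvRowlets).getD y [] = pvRowlets (grid.getD y []) := by
    intro y
    by_cases hy : y < grid.length
    · rw [List.getD_eq_getElem _ [] (by simpa using hy), List.getElem_map,
        List.getD_eq_getElem _ [] hy]
    · rw [List.getD_eq_getElem?_getD, List.getElem?_eq_none (by simpa using hy),
        List.getD_eq_getElem?_getD, List.getElem?_eq_none (by omega)]
      rfl
  have hInv0 : PvInv (PySem.Set.ofList ((pvDots grid).map (fun c => c.2))) grid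
      (grid.map pvRowlets)
      ((PySem.Set.ofList ((pvDots grid).map (fun c => c.2))).foldl
        (fun d (x : Nat) => d.insert (x : Int) (pvCollets grid x)) PySem.Dict.empty) := by
    refine ⟨by simp, ?_, ?_, ?_⟩
    · intro y
      rw [hrows0 y]
      exact fun a => Iff.rfl
    · intro y
      rw [hrows0 y]
      exact PySem.Set.nodup_ofList _
    · intro x hx
      rw [pv_cols_init_getD grid _ (PySem.Set.nodup_ofList _) x hx]
      exact ⟨fun a => Iff.rfl, PySem.Set.nodup_ofList _⟩
  have hX0 : ∀ c ∈ pvDots grid, c.2 ∈ PySem.Set.ofList ((pvDots grid).map (fun c => c.2)) := by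
    intro c hc
    rw [PySem.Set.mem_ofList]
    exact List.mem_map_of_mem hc
  have hloop := pv_loop_sim (PySem.Set.ofList ((pvDots grid).map (fun c => c.2)))
    ((grid.map (fun r => r.count ".")).sum + 1) grid [] (grid.map pvRowlets)
    ((PySem.Set.ofList ((pvDots grid).map (fun c => c.2))).foldl
      (fun d (x : Nat) => d.insert (x : Int) (pvCollets grid x)) PySem.Dict.empty) [] hInv0 hX0
  show PySem.Str.join "" ((PySem.List.sorted2
      (pvLoopA ((grid.map (fun r => r.count ".")).sum + 1) (grid, []))
      (fun t => t.1) (fun t => t.2.1)).map (fun t => t.2.2))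
    = PySem.Str.join "" ((PySem.List.sorted2
      (pvLoopB ((grid.map (fun r => r.count ".")).sum + 1)
        ⟨grid.map pvRowlets,
         (PySem.Set.ofList ((pvDots grid).map (fun c => c.2))).foldl
           (fun d (x : Nat) => d.insert (x : Int) (pvCollets grid x)) PySem.Dict.empty, [], []⟩
        (pvDots grid))
      (fun t => t.1) (fun t => t.2.1)).map (fun t => t.2.2))
  rw [hloop]

-- ===== VERDICT (by name: the statement is the Claim_ definition above) =====
theorem obtain_password_spec : Claim_equal_obtain_password := by
  intro grid _ _
  unfold Spec_obtain_password
  exact pv_main grid
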